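-- pv_equiv track=rewrite | github.com/DinhVitCuong/VACNIC-VN | process_data/precompute_data.py | find_name_positions
-- ===== SOURCE A (Python) =====
-- def find_name_positions(caption, names):
--     """
--     Find positions of names in caption.
--     Return a list of [start, end] pairs.
--     """
--     positions = []
--     for name in names:
--         start = caption.find(name)
--         while start != -1:
--             end = start + len(name)
--             positions.append([start, end])
--             start = caption.find(name, end)
--     return positions
-- ===== SOURCE B (Python) =====
-- def find_name_positions(caption, names):
--     positions = []
--     n = len(caption)
--     for name in names:
--         L = len(name)
--         prev_end = 0
--         for i in range(n - L + 1):
--             if caption[i:i+L] == name and i >= prev_end: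
--                 positions.append([i, i + L])
--                 prev_end = i + L
--     return positions
-- ===== Notes on version B (the rewrite author's own statement) =====
-- stated objective: alternative
-- what changed: Replaces A's repeated caption.find(name, end) jump-scan by a single left-to-right scan over all candidate start indices per name with a slice comparison and a greedy prev_end filter for non-overlapping matches.
import Mathlib
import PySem

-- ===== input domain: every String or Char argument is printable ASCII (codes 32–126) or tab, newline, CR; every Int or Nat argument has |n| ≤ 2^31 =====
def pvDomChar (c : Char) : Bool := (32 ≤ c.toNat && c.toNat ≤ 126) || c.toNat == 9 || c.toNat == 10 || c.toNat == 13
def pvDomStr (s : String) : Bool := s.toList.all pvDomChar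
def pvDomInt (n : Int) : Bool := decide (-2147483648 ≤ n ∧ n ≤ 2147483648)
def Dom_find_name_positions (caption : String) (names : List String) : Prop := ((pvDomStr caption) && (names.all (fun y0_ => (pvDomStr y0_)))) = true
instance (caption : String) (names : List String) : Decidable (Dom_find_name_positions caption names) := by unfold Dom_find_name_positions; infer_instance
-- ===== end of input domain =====

-- B replaces A's repeated str.find jumps by a single left-to-right scan of all start
-- indices per name with a greedy non-overlap filter (objective: alternative, not faster).

-- ===== PORT A =====
-- inner while loop of A: repeatedly caption.find(name, end); fuel only makes the
-- recursion total in Lean (on nonempty names it never runs out)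
def findA (cs name : List Char) (start : Int) (acc : List (List Int)) (fuel : Nat) : List (List Int) :=
  match fuel with
  | 0 => acc
  | fuel + 1 =>
    let f := PySem.Chars.findFrom cs name start none
    if f = -1 then acc
    else findA cs name (f + (name.length : Int)) (acc ++ [[f, f + (name.length : Int)]]) fuel

def find_name_positions (caption : String) (names : List String) : List (List Int) :=
  names.foldl (fun acc name =>
    findA caption.toList name.toList 0 acc (caption.toList.length + 1)) []

-- ===== PORT B =====
-- inner for loop of B: scan every start index i, keep matches with i >= prev_end
def altInner (cs name : List Char) (acc : List (List Int)) : List (List Int) :=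
  ((PySem.List.pyRange 0 ((cs.length : Int) - (name.length : Int) + 1) 1).foldl
    (fun st i =>
      if PySem.List.slice cs (some i) (some (i + (name.length : Int))) = name ∧ st.2 ≤ i then
        (st.1 ++ [[i, i + (name.length : Int)]], i + (name.length : Int))
      else st)
    (acc, (0 : Int))).1

def find_name_positions_alt (caption : String) (names : List String) : List (List Int) :=
  names.foldl (fun acc name => altInner caption.toList name.toList acc) []

-- ===== PRECONDITION & SPEC =====
-- Pre_ excludes an empty-string name, on which A's while loop never terminates
-- (caption.find("", end) returns end forever); B returns [[i, i]] for every i there.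
def Pre_find_name_positions (caption : String) (names : List String) : Prop := "" ∉ names
instance (caption : String) (names : List String) : Decidable (Pre_find_name_positions caption names) := by unfold Pre_find_name_positions; infer_instance
def pvWitness_find_name_positions : String × List String := ("abcabc", ["bc", "a"])

def Spec_find_name_positions (caption : String) (names : List String) (out : List (List Int)) : Prop := out = find_name_positions_alt caption names
instance (caption : String) (names : List String) (out : List (List Int)) : Decidable (Spec_find_name_positions caption names out) := by unfold Spec_find_name_positions; infer_instance

-- ===== CLAIM (what is proved, stated in full; the proofs are below) =====
def Claim_equal_find_name_positions : Prop := ∀ (caption : String) (names : List String), Dom_find_name_positions caption names → Pre_find_name_positions caption names → Spec_find_name_positions caption names (find_name_positions caption names)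

-- ===== LEMMAS AND PROOFS =====

-- greedy non-overlap selection from a list of candidate starts
def gg (L : Nat) : List Nat → Nat → List (List Int)
  | [], _ => []
  | s :: xs, p => if p ≤ s then [(s : Int), ((s + L : Nat) : Int)] :: gg L xs (s + L) else gg L xs p

-- all match positions of name in cs, in increasing order
def starts (cs name : List Char) : List Nat :=
  (List.range (cs.length - name.length + 1)).filter
    (fun i => decide ((cs.drop i).take name.length = name))

lemma gfilt (L : Nat) (xs : List Nat) : ∀ (p q : Nat), p ≤ q →
    gg L (xs.filter (fun i => decide (p ≤ i))) q = gg L (xs.filter (fun i => decide (q ≤ i))) q := by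
  induction xs with
  | nil => intro p q _; rfl
  | cons s xs ih =>
    intro p q hpq
    by_cases hp : p ≤ s
    · by_cases hq : q ≤ s
      · simp only [List.filter_cons, hp, hq, decide_true, if_true, gg]
        rw [ih p (s + L) (by omega), ih q (s + L) (by omega)]
      · simp [hp, hq, gg, ih p q hpq]
    · have hq : ¬ q ≤ s := fun h => hp (le_trans hpq h)
      simp [hp, hq, ih p q hpq]

lemma filter_cons_min (r k m : Nat) (p : Nat → Bool) (hm : m < r) (hpm : p m = true)
    (hk : k ≤ m) (hmin : ∀ i, k ≤ i → i < m → p i = false) :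
    ((List.range r).filter p).filter (fun i => decide (k ≤ i))
      = m :: ((List.range r).filter p).filter (fun i => decide (m + 1 ≤ i)) := by
  have hr : r = (m + 1) + (r - m - 1) := by omega
  rw [hr, List.range_add, List.range_succ]
  simp only [List.filter_append, List.filter_filter]
  have h1 : (List.range m).filter (fun a => decide (k ≤ a) && p a) = [] := by
    refine List.filter_eq_nil_iff.mpr ?_
    intro a ha
    have halt : a < m := List.mem_range.mp ha
    by_cases hka : k ≤ a
    · simp [hka, hmin a hka halt]
    · simp [hka]
  have h2 : (List.range m).filter (fun a => decide (m + 1 ≤ a) && p a) = [] := by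
    refine List.filter_eq_nil_iff.mpr ?_
    intro a ha
    have : a < m := List.mem_range.mp ha
    simp [show ¬ m + 1 ≤ a by omega]
  have h3 : ((List.range (r - m - 1)).map (fun x => m + 1 + x)).filter (fun a => decide (k ≤ a) && p a)
      = ((List.range (r - m - 1)).map (fun x => m + 1 + x)).filter (fun a => decide (m + 1 ≤ a) && p a) := by
    refine List.filter_congr ?_
    intro a ha
    obtain ⟨x, _, rfl⟩ := List.mem_map.mp ha
    simp [show k ≤ m + 1 + x by omega, show m + 1 ≤ m + 1 + x by omega]
  simp [h1, h3, hpm, hk]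
  intro a h h'
  exact absurd (h.trans h') (lt_irrefl a)

-- B's inner fold over candidate indices equals greedy selection over the match list
lemma bfold (cs name : List Char) (xs : List Nat) : ∀ (acc : List (List Int)) (p : Nat),
    ((xs.map (fun i : Nat => (i : Int))).foldl
      (fun (st : List (List Int) × Int) i =>
        if PySem.List.slice cs (some i) (some (i + (name.length : Int))) = name ∧ st.2 ≤ i then
          (st.1 ++ [[i, i + (name.length : Int)]], i + (name.length : Int))
        else st)
      (acc, (p : Int))).1
    = acc ++ gg name.length (xs.filter (fun i => decide ((cs.drop i).take name.length = name))) p := by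
  induction xs with
  | nil => intro acc p; simp [gg]
  | cons x xs ih =>
    intro acc p
    have hsl : PySem.List.slice cs (some (x : Int)) (some ((x : Int) + (name.length : Int)))
        = (cs.drop x).take name.length := PySem.List.slice_natCast_add cs x name.length
    by_cases hm : (cs.drop x).take name.length = name
    · by_cases hp : p ≤ x
      · simp only [List.map_cons, List.foldl_cons]
        rw [if_pos ⟨by rw [hsl]; exact hm, by exact_mod_cast hp⟩]
        have hcast : ((x : Int) + (name.length : Int)) = (((x + name.length : Nat)) : Int) := by
          push_cast; ring
        rw [hcast, ih (acc ++ [[(x : Int), ((x + name.length : Nat) : Int)]]) (x + name.length)]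
        simp [gg, hm, hp, List.append_assoc]
      · simp only [List.map_cons, List.foldl_cons]
        rw [if_neg (by rintro ⟨-, h2⟩; exact hp (by exact_mod_cast h2))]
        rw [ih acc p]
        simp [gg, hm, hp]
    · simp only [List.map_cons, List.foldl_cons]
      rw [if_neg (by rintro ⟨h1, -⟩; exact hm (by rwa [hsl] at h1))]
      rw [ih acc p]
      simp [hm]

-- A's find loop equals greedy selection over the match positions at or beyond k
lemma mainA (cs name : List Char) (hne : name ≠ []) :
    ∀ (fuel k : Nat) (acc : List (List Int)), k ≤ cs.length → cs.length + 1 - k ≤ fuel →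
    findA cs name (k : Int) acc fuel
      = acc ++ gg name.length ((starts cs name).filter (fun i => decide (k ≤ i))) k := by
  intro fuel
  induction fuel with
  | zero => intro k acc hk hfuel; omega
  | succ fuel ih =>
    intro k acc hk hfuel
    by_cases hf : PySem.Chars.findFrom cs name (k : Int) none = -1
    · have hno : ¬ name <:+: cs.drop k :=
        (PySem.Chars.findFrom_natCast_eq_neg_one_iff cs name k hk).mp hf
      have hfil : (starts cs name).filter (fun i => decide (k ≤ i)) = [] := by
        refine List.filter_eq_nil_iff.mpr ?_
        intro x hx hdx
        have hki : k ≤ x := by simpa using hdx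
        have hmx : (cs.drop x).take name.length = name := by
          have := List.of_mem_filter hx
          simpa using this
        have hpref : name <+: cs.drop x := by
          rw [← hmx]; exact List.take_prefix _ _
        have hdd : cs.drop x = (cs.drop k).drop (x - k) := by
          rw [List.drop_drop]; congr 1; omega
        have : name <:+: cs.drop k := by
          rw [hdd] at hpref
          exact hpref.isInfix.trans (List.drop_suffix _ _).isInfix
        exact hno this
      simp [findA, hf, hfil, gg]
    · obtain ⟨hkf, hpref, hmin⟩ := PySem.Chars.findFrom_natCast_spec cs name k hk hf
      set f := PySem.Chars.findFrom cs name (k : Int) none with hfdef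
      have hf0 : 0 ≤ f := le_trans (by exact_mod_cast Nat.zero_le k) hkf
      set m := f.toNat with hmdef
      have hfm : f = (m : Int) := by omega
      have hkm : k ≤ m := by omega
      have hL1 : 1 ≤ name.length := by
        cases name with
        | nil => exact absurd rfl hne
        | cons a l => simp
      have hlen : name.length ≤ cs.length - m := by
        have := hpref.length_le
        simpa using this
      have hmL : m + name.length ≤ cs.length := by omega
      have hpm : (fun i => decide ((cs.drop i).take name.length = name)) m = true := by
        have : name = (cs.drop m).take name.length := by
          have := List.prefix_iff_eq_take.mp hpref
          simpa using this
        simp [← this]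
      have hcons := filter_cons_min (cs.length - name.length + 1) k m
        (fun i => decide ((cs.drop i).take name.length = name)) (by omega) hpm hkm
        (by
          intro i hki him
          have hnp : ¬ name <+: cs.drop i := hmin i hki him
          by_cases h : (cs.drop i).take name.length = name
          · exact absurd (by rw [← h]; exact List.take_prefix _ _) hnp
          · simp [h])
      rw [show findA cs name (k : Int) acc (fuel + 1)
            = findA cs name (f + (name.length : Int)) (acc ++ [[f, f + (name.length : Int)]]) fuel by
          simp [findA, hf, ← hfdef]]
      have hcast : f + (name.length : Int) = ((m + name.length : Nat) : Int) := by
        rw [hfm]; push_cast; ring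
      rw [hcast, hfm]
      rw [ih (m + name.length) (acc ++ [[(m : Int), ((m + name.length : Nat) : Int)]]) hmL (by omega)]
      unfold starts
      rw [hcons]
      simp only [gg, hkm, if_true]
      rw [gfilt name.length _ (m + 1) (m + name.length) (by omega)]
      simp [List.append_assoc]

-- per-name: A's inner loop equals B's inner loop
lemma perName (cs name : List Char) (hne : name ≠ []) (acc : List (List Int)) :
    findA cs name 0 acc (cs.length + 1) = altInner cs name acc := by
  have hL1 : 1 ≤ name.length := by
    cases name with
    | nil => exact absurd rfl hne
    | cons a l => simp
  by_cases hLn : name.length ≤ cs.length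
  · have h1 : ((cs.length : Int) - (name.length : Int) + 1)
        = ((cs.length - name.length + 1 : Nat) : Int) := by rw [Nat.cast_add, Nat.cast_sub hLn]; ring
    unfold altInner
    rw [h1, PySem.List.pyRange_zero_natCast, List.foldl_map]
    have hb := bfold cs name (List.range (cs.length - name.length + 1)) acc 0
    rw [List.foldl_map, Nat.cast_zero] at hb
    rw [hb]
    have h0 : findA cs name ((0 : Nat) : Int) acc (cs.length + 1)
        = acc ++ gg name.length ((starts cs name).filter (fun i => decide (0 ≤ i))) 0 :=
      mainA cs name hne (cs.length + 1) 0 acc (Nat.zero_le _) (by omega)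
    have hfil : (starts cs name).filter (fun i => decide (0 ≤ i)) = starts cs name :=
      List.filter_eq_self.mpr (by intro a _; simp)
    rw [hfil] at h0
    simpa [starts] using h0
  · have hfneg : PySem.Chars.findFrom cs name (0 : Int) none = -1 := by
      have h0 : ((0 : Nat) : Int) = (0 : Int) := by norm_num
      rw [← h0]
      refine (PySem.Chars.findFrom_natCast_eq_neg_one_iff cs name 0 (Nat.zero_le _)).mpr ?_
      intro hinf
      have := hinf.length_le
      simp at this
      omega
    have hA : findA cs name 0 acc (cs.length + 1) = acc := by
      simp [findA, hfneg]
    have hnil : PySem.List.pyRange 0 ((cs.length : Int) - (name.length : Int) + 1) 1 = [] :=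
      PySem.List.pyRange_one_eq_nil (by omega)
    rw [hA]
    unfold altInner
    rw [hnil]
    rfl

-- ===== VERDICT (by name: the statement is the Claim_ definition above) =====
theorem find_name_positions_spec : Claim_equal_find_name_positions := by
  intro caption names _ hpre
  unfold Spec_find_name_positions find_name_positions find_name_positions_alt
  have : ∀ (ns : List String), ("" ∉ ns) → ∀ (acc : List (List Int)),
      ns.foldl (fun acc name =>
        findA caption.toList name.toList 0 acc (caption.toList.length + 1)) acc
      = ns.foldl (fun acc name => altInner caption.toList name.toList acc) acc := by
    intro ns
    induction ns with
    | nil => intro _ acc; rfl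
    | cons name rest ih =>
      intro hmem acc
      have hne : name.toList ≠ [] := by
        intro h
        exact hmem (by simp [String.toList_eq_nil_iff.mp h])
      simp only [List.foldl_cons]
      rw [perName caption.toList name.toList hne acc]
      exact ih (fun h => hmem (List.mem_cons_of_mem _ h)) _
  exact this names hpre []
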